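-- pv_equiv track=rewrite | github.com/Anya97/Python_algorithms_2021 | les_3_task_6.py | summa_maximum_minimum
-- ===== SOURCE A (Python) =====
-- def summa_maximum_minimum(lst):
--     maximum = lst[0]
--     minimum = lst[0]
--     min_index = 0
--     max_index = 0
--     summa = 0
--
--     for i in range(len(lst)):
--         if lst[i] > maximum:
--             maximum = lst[i]
--             max_index = i
--         elif lst[i] < minimum:
--             minimum = lst[i]
--             min_index = i
--
--     if max_index > min_index:
--         for j in lst[min_index + 1:max_index]:
--             summa += j
--     else:
--         for j in lst[max_index + 1:min_index]:
--             summa += j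
--     return summa
-- ===== SOURCE B (Python) =====
-- def summa_maximum_minimum(lst):
--     mn = mx = lst[0]
--     lo = hi = 0
--     p_lo = p_hi = prefix = 0
--     for i, v in enumerate(lst):
--         if v > mx:
--             mx, hi, p_hi = v, i, prefix
--         elif v < mn:
--             mn, lo, p_lo = v, i, prefix
--         prefix += v
--     if lo < hi:
--         return p_hi - p_lo - mn
--     if hi < lo:
--         return p_lo - p_hi - mx
--     return 0
-- ===== Notes on version B (the rewrite author's own statement) =====
-- stated objective: alternative
-- what changed: Replaces A's two-phase computation (scan for extrema indices, then a second loop summing the slice between them) with ONE fused pass that maintains a running prefix sum and snapshots it whenever the min or max updates, so the answer is a difference of two prefix-sum snapshots and no slice or second loop exists; on the empty list A raises IndexError and B raises too, excluded by Pre_.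
import Mathlib
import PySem

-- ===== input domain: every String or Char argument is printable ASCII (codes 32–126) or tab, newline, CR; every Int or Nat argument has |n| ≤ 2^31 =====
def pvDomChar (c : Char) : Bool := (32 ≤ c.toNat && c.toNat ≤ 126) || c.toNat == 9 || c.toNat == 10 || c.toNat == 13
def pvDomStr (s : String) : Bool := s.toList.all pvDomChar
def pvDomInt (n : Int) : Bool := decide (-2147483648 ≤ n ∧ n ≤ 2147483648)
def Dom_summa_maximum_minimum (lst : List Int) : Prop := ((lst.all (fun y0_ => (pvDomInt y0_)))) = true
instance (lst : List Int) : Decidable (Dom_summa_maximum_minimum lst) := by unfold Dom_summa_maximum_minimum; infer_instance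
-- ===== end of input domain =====

-- B fuses A's two phases (scan for extrema indices, then a second loop over the slice between
-- them) into ONE pass keeping a running prefix sum, snapshotted when the min/max updates;
-- the answer is a difference of prefix-sum snapshots, no slice or second loop (return value only).

-- ===== PORT A =====
-- A's loop body: one step of the index loop over range(len(lst)), state (maximum, minimum, min_index, max_index)
def pvStepA (lst : List Int) (st : Int × Int × Int × Int) (i : Int) : Int × Int × Int × Int :=
  let v := PySem.List.pyGetD lst i 0
  if v > st.1 then (v, st.2.1, st.2.2.1, i)
  else if v < st.2.1 then (st.1, v, i, st.2.2.2)
  else st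

def summa_maximum_minimum (lst : List Int) : Int :=
  match lst with
  | [] => 0   -- Python raises IndexError on lst[0]; excluded by Pre_
  | x :: _ =>
    let st := (PySem.List.pyRange 0 lst.length 1).foldl (pvStepA lst) (x, x, 0, 0)
    let min_index := st.2.2.1
    let max_index := st.2.2.2
    if max_index > min_index then
      (PySem.List.slice lst (some (min_index + 1)) (some max_index)).foldl (· + ·) 0
    else
      (PySem.List.slice lst (some (max_index + 1)) (some min_index)).foldl (· + ·) 0

-- ===== PORT B =====
-- B's loop state: mn, mx, lo, hi, p_lo, p_hi, prefix (in Source B's order)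
structure PvStB where
  mn : Int
  mx : Int
  lo : Int
  hi : Int
  plo : Int
  phi : Int
  pre : Int
deriving DecidableEq, Repr

-- B's loop body over enumerate(lst): update an extremum (snapshotting prefix), then prefix += v
def pvStepB (st : PvStB) (iv : Int × Int) : PvStB :=
  let st' :=
    if iv.2 > st.mx then { st with mx := iv.2, hi := iv.1, phi := st.pre }
    else if iv.2 < st.mn then { st with mn := iv.2, lo := iv.1, plo := st.pre }
    else st
  { st' with pre := st'.pre + iv.2 }

def summa_maximum_minimum_alt (lst : List Int) : Int :=
  match lst with
  | [] => 0   -- Python raises IndexError on lst[0]; excluded by Pre_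
  | x :: _ =>
    let st := (PySem.List.enumerate lst 0).foldl pvStepB ⟨x, x, 0, 0, 0, 0, 0⟩
    if st.lo < st.hi then st.phi - st.plo - st.mn
    else if st.hi < st.lo then st.plo - st.phi - st.mx
    else 0

-- ===== PRECONDITION & SPEC =====
-- Pre_ excludes exactly the empty list, on which both A and B raise IndexError (lst[0]).
def Pre_summa_maximum_minimum (lst : List Int) : Prop := lst ≠ []
instance (lst : List Int) : Decidable (Pre_summa_maximum_minimum lst) := by unfold Pre_summa_maximum_minimum; infer_instance
def pvWitness_summa_maximum_minimum : List Int := [3, 1, 4, 1, 5]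

def Spec_summa_maximum_minimum (lst : List Int) (out : Int) : Prop := out = summa_maximum_minimum_alt lst
instance (lst : List Int) (out : Int) : Decidable (Spec_summa_maximum_minimum lst out) := by unfold Spec_summa_maximum_minimum; infer_instance

-- ===== CLAIM (what is proved, stated in full; the proofs are below) =====
def Claim_equal_summa_maximum_minimum : Prop := ∀ (lst : List Int), Dom_summa_maximum_minimum lst → Pre_summa_maximum_minimum lst → Spec_summa_maximum_minimum lst (summa_maximum_minimum lst)

-- ===== LEMMAS AND PROOFS =====

-- A's scan computes: max value, min value, first index of the min, first index of the max.
theorem pvFoldA_eq (x : Int) (t : List Int) :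
    (PySem.List.pyRange 0 (x :: t).length 1).foldl (pvStepA (x :: t)) (x, x, 0, 0)
      = (t.foldl max x, t.foldl min x,
         (((PySem.List.index? (x :: t) (t.foldl min x)).getD 0 : Nat) : Int),
         (((PySem.List.index? (x :: t) (t.foldl max x)).getD 0 : Nat) : Int)) := by
  induction t using List.reverseRecOn with
  | nil =>
      have h1 : ((([x] : List Int).length : Nat) : Int) = 0 + 1 := by simp
      rw [h1, PySem.List.pyRange_one_singleton]
      simp [pvStepA, PySem.List.pyGetD_zero_cons]
  | append_singleton t0 y ih =>
      set l0 : List Int := x :: t0 with hl0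
      set M : Int := t0.foldl max x with hM
      set m : Int := t0.foldl min x with hm
      have hMmem : M ∈ l0 := PySem.List.max?_mem (PySem.List.max?_id_cons x t0)
      have hmmem : m ∈ l0 := PySem.List.min?_mem (PySem.List.min?_id_cons x t0)
      have hleM : ∀ z ∈ l0, z ≤ M := by
        intro z hz
        rcases List.mem_cons.mp hz with h | h
        · exact h ▸ (PySem.List.le_foldl_max t0 x).1
        · exact (PySem.List.le_foldl_max t0 x).2 z h
      have hgem : ∀ z ∈ l0, m ≤ z := by
        intro z hz
        rcases List.mem_cons.mp hz with h | h
        · exact h ▸ (PySem.List.foldl_min_le t0 x).1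
        · exact (PySem.List.foldl_min_le t0 x).2 z h
      have hmM : m ≤ M := le_trans (hgem M hMmem) le_rfl
      have hlen : (((l0 ++ [y]).length : Nat) : Int) = (l0.length : Int) + 1 := by
        simp
      have hrange : PySem.List.pyRange 0 (((l0 ++ [y]).length : Nat) : Int) 1
          = PySem.List.pyRange 0 (l0.length : Int) 1 ++ [(l0.length : Int)] := by
        rw [hlen, PySem.List.pyRange_one_succ_right (by positivity)]
      have hcongr : (PySem.List.pyRange 0 (l0.length : Int) 1).foldl (pvStepA (l0 ++ [y])) (x, x, 0, 0)
          = (PySem.List.pyRange 0 (l0.length : Int) 1).foldl (pvStepA l0) (x, x, 0, 0) := by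
        apply PySem.List.foldl_congr_mem
        intro acc i hi
        obtain ⟨h0, h1⟩ := PySem.List.mem_pyRange_one.mp hi
        have h1' : i < ((l0 ++ [y]).length : Int) := by simp; omega
        have hilt : i.toNat < l0.length := by omega
        unfold pvStepA
        rw [PySem.List.pyGetD_eq_getElem _ _ h0 h1', PySem.List.pyGetD_eq_getElem _ _ h0 (by exact_mod_cast h1),
          List.getElem_append_left hilt]
      have hy : PySem.List.pyGetD (l0 ++ [y]) (l0.length : Int) 0 = y := by
        rw [PySem.List.pyGetD_natCast]; simp
      have hxcons : x :: (t0 ++ [y]) = l0 ++ [y] := rfl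
      rw [hxcons, hrange, List.foldl_append, hcongr, ih]
      have hfmax : (t0 ++ [y]).foldl max x = max M y := by rw [List.foldl_append]; rfl
      have hfmin : (t0 ++ [y]).foldl min x = min m y := by rw [List.foldl_append]; rfl
      simp only [List.foldl_cons, List.foldl_nil, pvStepA, hy]
      by_cases hgt : y > M
      · have hynotmem : y ∉ l0 := fun hmem => absurd (hleM y hmem) (not_le.mpr hgt)
        have hmaxy : max M y = y := max_eq_right (le_of_lt hgt)
        have hminy : min m y = m := min_eq_left (le_trans hmM (le_of_lt hgt))
        simp only [hgt, if_pos, hfmax, hfmin, hmaxy, hminy]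
        rw [PySem.List.index?_append_singleton_self l0 y hynotmem,
          PySem.List.index?_append_of_mem [y] hmmem]
        simp
      · by_cases hlt : y < m
        · have hynotmem : y ∉ l0 := fun hmem => absurd (hgem y hmem) (not_le.mpr hlt)
          have hmaxy : max M y = M := max_eq_left (not_lt.mp hgt)
          have hminy : min m y = y := min_eq_right (le_of_lt hlt)
          simp only [hgt, hlt, if_pos, if_false, hfmax, hfmin, hmaxy, hminy]
          rw [PySem.List.index?_append_singleton_self l0 y hynotmem,
            PySem.List.index?_append_of_mem [y] hMmem]
          simp
        · have hmaxy : max M y = M := max_eq_left (not_lt.mp hgt)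
          have hminy : min m y = m := min_eq_left (not_lt.mp hlt)
          simp only [hgt, hlt, if_false, hfmax, hfmin, hmaxy, hminy]
          rw [PySem.List.index?_append_of_mem [y] hMmem,
            PySem.List.index?_append_of_mem [y] hmmem]

-- first index of a member: getD-form access
theorem pvIdxSpec (l : List Int) (v : Int) (hv : v ∈ l) :
    ∃ k, PySem.List.index? l v = some k ∧ ∃ hk : k < l.length, l[k] = v := by
  have hs : (PySem.List.index? l v).isSome := (PySem.List.index?_isSome_iff _ _).mpr hv
  obtain ⟨k, hk⟩ := Option.isSome_iff_exists.mp hs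
  obtain ⟨hkl, hval, _⟩ := PySem.List.getElem_of_index?_eq_some hk
  exact ⟨k, hk, hkl, hval⟩

-- B's fused pass computes: extrema, their first indices, the prefix sums before those indices,
-- and the total sum.
theorem pvFoldB_eq (x : Int) (t : List Int) :
    (PySem.List.enumerate (x :: t) 0).foldl pvStepB ⟨x, x, 0, 0, 0, 0, 0⟩
      = ⟨t.foldl min x, t.foldl max x,
         (((PySem.List.index? (x :: t) (t.foldl min x)).getD 0 : Nat) : Int),
         (((PySem.List.index? (x :: t) (t.foldl max x)).getD 0 : Nat) : Int),
         ((x :: t).take ((PySem.List.index? (x :: t) (t.foldl min x)).getD 0)).sum,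
         ((x :: t).take ((PySem.List.index? (x :: t) (t.foldl max x)).getD 0)).sum,
         (x :: t).sum⟩ := by
  induction t using List.reverseRecOn with
  | nil =>
      simp [PySem.List.enumerate_cons, PySem.List.enumerate_nil, pvStepB]
  | append_singleton t0 y ih =>
      set l0 : List Int := x :: t0 with hl0
      set M : Int := t0.foldl max x with hM
      set m : Int := t0.foldl min x with hm
      have hMmem : M ∈ l0 := PySem.List.max?_mem (PySem.List.max?_id_cons x t0)
      have hmmem : m ∈ l0 := PySem.List.min?_mem (PySem.List.min?_id_cons x t0)
      have hleM : ∀ z ∈ l0, z ≤ M := by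
        intro z hz
        rcases List.mem_cons.mp hz with h | h
        · exact h ▸ (PySem.List.le_foldl_max t0 x).1
        · exact (PySem.List.le_foldl_max t0 x).2 z h
      have hgem : ∀ z ∈ l0, m ≤ z := by
        intro z hz
        rcases List.mem_cons.mp hz with h | h
        · exact h ▸ (PySem.List.foldl_min_le t0 x).1
        · exact (PySem.List.foldl_min_le t0 x).2 z h
      have hmM : m ≤ M := le_trans (hgem M hMmem) le_rfl
      obtain ⟨lo, hloeq, hlolt, _⟩ := pvIdxSpec l0 m hmmem
      obtain ⟨hi, hhieq, hhilt, _⟩ := pvIdxSpec l0 M hMmem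
      have htakelo : (l0 ++ [y]).take lo = l0.take lo :=
        List.take_append_of_le_length (le_of_lt hlolt)
      have htakehi : (l0 ++ [y]).take hi = l0.take hi :=
        List.take_append_of_le_length (le_of_lt hhilt)
      have htakelen : (l0 ++ [y]).take l0.length = l0 := by
        rw [List.take_append_of_le_length le_rfl, List.take_length]
      have henum : PySem.List.enumerate (x :: (t0 ++ [y])) 0
          = PySem.List.enumerate l0 0 ++ [((l0.length : Int), y)] := by
        have : x :: (t0 ++ [y]) = l0 ++ [y] := rfl
        rw [this, PySem.List.enumerate_append]
        simp [PySem.List.enumerate_cons, PySem.List.enumerate_nil]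
      rw [henum, List.foldl_append, ih]
      have hfmax : (t0 ++ [y]).foldl max x = max M y := by rw [List.foldl_append]; rfl
      have hfmin : (t0 ++ [y]).foldl min x = min m y := by rw [List.foldl_append]; rfl
      simp only [List.foldl_cons, List.foldl_nil, pvStepB, hfmax, hfmin]
      by_cases hgt : y > M
      · have hynotmem : y ∉ l0 := fun hmem => absurd (hleM y hmem) (not_le.mpr hgt)
        have hmaxy : max M y = y := max_eq_right (le_of_lt hgt)
        have hminy : min m y = m := min_eq_left (le_trans hmM (le_of_lt hgt))
        simp only [hgt, if_pos, hmaxy, hminy]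
        rw [show x :: (t0 ++ [y]) = l0 ++ [y] from rfl,
          PySem.List.index?_append_singleton_self l0 y hynotmem,
          PySem.List.index?_append_of_mem [y] hmmem, hloeq]
        simp only [Option.getD_some, htakelo, htakelen]
        simp
      · by_cases hlt : y < m
        · have hynotmem : y ∉ l0 := fun hmem => absurd (hgem y hmem) (not_le.mpr hlt)
          have hmaxy : max M y = M := max_eq_left (not_lt.mp hgt)
          have hminy : min m y = y := min_eq_right (le_of_lt hlt)
          simp only [hgt, hlt, if_pos, if_false, hmaxy, hminy]
          rw [show x :: (t0 ++ [y]) = l0 ++ [y] from rfl,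
            PySem.List.index?_append_singleton_self l0 y hynotmem,
            PySem.List.index?_append_of_mem [y] hMmem, hhieq]
          simp only [Option.getD_some, htakehi, htakelen]
          simp
        · have hmaxy : max M y = M := max_eq_left (not_lt.mp hgt)
          have hminy : min m y = m := min_eq_left (not_lt.mp hlt)
          simp only [hgt, hlt, if_false, hmaxy, hminy]
          rw [show x :: (t0 ++ [y]) = l0 ++ [y] from rfl,
            PySem.List.index?_append_of_mem [y] hMmem,
            PySem.List.index?_append_of_mem [y] hmmem, hloeq, hhieq]
          simp only [Option.getD_some, htakelo, htakehi]
          simp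

-- sum of xs[j:k] as a difference of prefix sums
theorem pvSumDropTake (xs : List Int) (j k : Nat) (h : j ≤ k) :
    ((xs.drop j).take (k - j)).sum = (xs.take k).sum - (xs.take j).sum := by
  have : xs.take k = xs.take j ++ (xs.drop j).take (k - j) := by
    rw [← List.take_append_drop j (xs.take k)]
    congr 1
    · rw [List.take_take, min_eq_left h]
    · rw [List.drop_take]
  rw [this, List.sum_append]; ring


-- ===== VERDICT (by name: the statement is the Claim_ definition above) =====
theorem summa_maximum_minimum_spec : Claim_equal_summa_maximum_minimum := by
  intro lst _ hpre
  unfold Spec_summa_maximum_minimum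
  obtain ⟨x, t, rfl⟩ := List.exists_cons_of_ne_nil hpre
  set m : Int := t.foldl min x with hm
  set M : Int := t.foldl max x with hM
  have hmmem : m ∈ x :: t := PySem.List.min?_mem (PySem.List.min?_id_cons x t)
  have hMmem : M ∈ x :: t := PySem.List.max?_mem (PySem.List.max?_id_cons x t)
  obtain ⟨lo, hloeq, hlolt, hloval⟩ := pvIdxSpec _ m hmmem
  obtain ⟨hi, hhieq, hhilt, hhival⟩ := pvIdxSpec _ M hMmem
  simp only [summa_maximum_minimum, summa_maximum_minimum_alt, pvFoldA_eq, pvFoldB_eq,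
    ← hm, ← hM, hloeq, hhieq, Option.getD_some]
  by_cases h : lo < hi
  · rw [if_pos (by exact_mod_cast h), if_pos (by exact_mod_cast h)]
    have hc : ((lo : Int) + 1) = ((lo + 1 : Nat) : Int) := by push_cast; ring
    rw [hc, PySem.List.slice_natCast, ← List.sum_eq_foldl, pvSumDropTake _ _ _ (by omega),
      List.take_add_one, List.sum_append]
    have : (x :: t)[lo]?.toList.sum = m := by
      rw [List.getElem?_eq_getElem hlolt, hloval]; simp
    rw [this]; ring
  · rw [if_neg (by exact_mod_cast h), if_neg (by exact_mod_cast h)]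
    by_cases h2 : hi < lo
    · rw [if_pos (by exact_mod_cast h2)]
      have hc : ((hi : Int) + 1) = ((hi + 1 : Nat) : Int) := by push_cast; ring
      rw [hc, PySem.List.slice_natCast, ← List.sum_eq_foldl, pvSumDropTake _ _ _ (by omega),
        List.take_add_one, List.sum_append]
      have : (x :: t)[hi]?.toList.sum = M := by
        rw [List.getElem?_eq_getElem hhilt, hhival]; simp
      rw [this]; ring
    · rw [if_neg (by exact_mod_cast h2)]
      have heq : lo = hi := by omega
      subst heq
      have hc : ((lo : Int) + 1) = ((lo + 1 : Nat) : Int) := by push_cast; ring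
      rw [hc, PySem.List.slice_natCast, ← List.sum_eq_foldl]
      have : lo - (lo + 1) = 0 := by omega
      rw [this]; simp
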